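-- pv_equiv track=rewrite | github.com/ViachaslauKazakou/Python-Preparations | short_examples/cinema_place.py | seat2
-- ===== SOURCE A (Python) =====
-- def seat2(a, b):
--     # create array
--     student_number = 1
--     arr = [[0]*a for j in range(b)]
--     for j in range(a):
--         for i in range(b):
--             arr[i][j] = student_number
--             student_number += 1
--     return arr
-- ===== SOURCE B (Python) =====
-- def seat2(a, b):
--     # Stage 1: build the grid in column-major form; column j is the
--     # consecutive block of seat numbers j*b+1 .. j*b+b.
--     cols = [list(range(j * b + 1, j * b + b + 1)) for j in range(a)]
--     # Stage 2: transpose the column list into row-major order.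
--     return [[col[i] for col in cols] for i in range(b)]
-- ===== Notes on version B (the rewrite author's own statement) =====
-- stated objective: alternative
-- what changed: Instead of allocating a b-by-a grid of zeros and filling it cell by cell with a running student_number counter, B first builds the grid column-major as a list of consecutive number blocks (column j = range(j*b+1, j*b+b+1)) and then transposes that column list into rows, with no mutable grid and no counter.
import Mathlib
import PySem

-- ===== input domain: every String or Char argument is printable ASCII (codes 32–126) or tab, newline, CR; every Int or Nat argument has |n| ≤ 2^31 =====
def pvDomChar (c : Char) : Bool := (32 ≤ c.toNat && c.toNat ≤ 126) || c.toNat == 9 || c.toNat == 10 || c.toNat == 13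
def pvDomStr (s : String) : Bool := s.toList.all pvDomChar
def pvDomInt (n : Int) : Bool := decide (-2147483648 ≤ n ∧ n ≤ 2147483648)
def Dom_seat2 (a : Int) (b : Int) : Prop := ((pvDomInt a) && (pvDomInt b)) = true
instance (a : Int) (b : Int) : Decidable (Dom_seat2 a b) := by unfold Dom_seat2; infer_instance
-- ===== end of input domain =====

-- B replaces A's allocate-then-fill grid with a running counter by a two-stage algorithm:
-- build the grid column-major as consecutive number blocks, then transpose; objective: alternative.

-- ===== PORT A =====
-- arr = [[0]*a for j in range(b)]; [0]*a for a ≤ 0 is [], hence List.replicate a.toNat.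
-- arr[i][j] = v on always-in-range indices is PySem.List.pySetD/pyGetD.
def seat2 (a : Int) (b : Int) : List (List Int) :=
  ((PySem.List.pyRange 0 a 1).foldl
    (fun (st : List (List Int) × Int) j =>
      (PySem.List.pyRange 0 b 1).foldl
        (fun (st : List (List Int) × Int) i =>
          (PySem.List.pySetD st.1 i (PySem.List.pySetD (PySem.List.pyGetD st.1 i []) j st.2), st.2 + 1))
        st)
    ((PySem.List.pyRange 0 b 1).map (fun _ => List.replicate a.toNat (0 : Int)), 1)).1

-- ===== PORT B =====
-- Stage 1: cols = [list(range(j*b+1, j*b+b+1)) for j in range(a)]  (column-major grid).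
-- Stage 2: transpose: [[col[i] for col in cols] for i in range(b)]; col[i] is always
-- in range when the row loop runs, so pyGetD is exact here.
def seat2_alt (a : Int) (b : Int) : List (List Int) :=
  let cols := (PySem.List.pyRange 0 a 1).map
    (fun j => PySem.List.pyRange (j * b + 1) (j * b + b + 1) 1)
  (PySem.List.pyRange 0 b 1).map (fun i => cols.map (fun col => PySem.List.pyGetD col i 0))

-- ===== PRECONDITION & SPEC =====
def Spec_seat2 (a : Int) (b : Int) (out : List (List Int)) : Prop := out = seat2_alt a b
instance (a : Int) (b : Int) (out : List (List Int)) : Decidable (Spec_seat2 a b out) := by unfold Spec_seat2; infer_instance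

-- ===== CLAIM (what is proved, stated in full; the proofs are below) =====
def Claim_equal_seat2 : Prop := ∀ (a : Int) (b : Int), Dom_seat2 a b → Spec_seat2 a b (seat2 a b)

-- ===== LEMMAS AND PROOFS =====

-- range(0, x) equals range(0, max(x, 0))
lemma pyRange_zero_toNat (x : Int) :
    PySem.List.pyRange 0 x 1 = PySem.List.pyRange 0 (x.toNat : Int) 1 := by
  rw [PySem.List.pyRange_one, PySem.List.pyRange_one]
  rw [show ((x.toNat : Int) - 0).toNat = (x - 0).toNat by omega]

lemma mapIdx_map_range {β : Type} (M : Nat) (f : Nat → β) (F : Nat → β → β) :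
    ((List.range M).map f).mapIdx (fun i x => F i x) = (List.range M).map (fun i => F i (f i)) := by
  apply List.ext_getElem <;> simp

lemma set_map_range (N t : Nat) (g : Nat → Int) (v : Int) (_ht : t < N) :
    ((List.range N).map g).set t v = (List.range N).map (fun j => if j = t then v else g j) := by
  apply List.ext_getElem
  · simp
  · intro k h1 h2
    simp only [List.getElem_set, List.getElem_map, List.getElem_range]
    by_cases hk : t = k
    · simp [hk]
    · simp [hk, Ne.symm hk]

-- the inner 'for i in range(b)' loop: writes c, c+1, … down column j and advances the counter
lemma seat2_inner (j : Int) :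
    ∀ (arr pre : List (List Int)) (c : Int),
      (PySem.List.pyRange (pre.length : Int) ((pre.length : Int) + (arr.length : Int)) 1).foldl
        (fun (st : List (List Int) × Int) i =>
          (PySem.List.pySetD st.1 i (PySem.List.pySetD (PySem.List.pyGetD st.1 i []) j st.2), st.2 + 1))
        (pre ++ arr, c)
      = (pre ++ arr.mapIdx (fun k row => PySem.List.pySetD row j (c + (k : Int))),
         c + (arr.length : Int)) := by
  intro arr
  induction arr with
  | nil => intro pre c; rw [PySem.List.pyRange_one_eq_nil (by simp)]; simp
  | cons row arr ih =>
    intro pre c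
    rw [PySem.List.pyRange_one_cons (by simp only [List.length_cons]; push_cast; omega)]
    simp only [List.foldl_cons]
    have hget : PySem.List.pyGetD (pre ++ row :: arr) (pre.length : Int) ([] : List Int) = row := by
      simp [List.getD]
    have hset : ∀ v : List Int,
        PySem.List.pySetD (pre ++ row :: arr) (pre.length : Int) v = pre ++ v :: arr := by
      intro v; simp
    rw [hget, hset]
    have hre : (pre ++ (PySem.List.pySetD row j c) :: arr)
        = (pre ++ [PySem.List.pySetD row j c]) ++ arr := by simp
    have hrng : PySem.List.pyRange ((pre.length : Int) + 1)
          ((pre.length : Int) + ((row :: arr).length : Int)) 1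
        = PySem.List.pyRange (((pre ++ [PySem.List.pySetD row j c]).length : Nat) : Int)
          ((((pre ++ [PySem.List.pySetD row j c]).length : Nat) : Int) + (arr.length : Int)) 1 := by
      congr 1 <;> simp only [List.length_append, List.length_cons, List.length_nil] <;>
        push_cast <;> ring
    rw [hre, hrng, ih (pre ++ [PySem.List.pySetD row j c]) (c + 1)]
    rw [Prod.mk.injEq]
    refine ⟨?_, ?_⟩
    · simp only [List.mapIdx_cons, List.append_assoc, List.singleton_append,
        Nat.cast_zero, add_zero]
      congr 1
      congr 1
      apply List.mapIdx_eq_mapIdx_iff.mpr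
      intro i _; congr 1; push_cast; ring
    · simp only [List.length_cons]; push_cast; ring

-- the inner loop started on the whole grid (pre = [])
lemma seat2_inner0 (j c : Int) (arr : List (List Int)) :
    (PySem.List.pyRange 0 (arr.length : Int) 1).foldl
      (fun (st : List (List Int) × Int) i =>
        (PySem.List.pySetD st.1 i (PySem.List.pySetD (PySem.List.pyGetD st.1 i []) j st.2), st.2 + 1))
      (arr, c)
    = (arr.mapIdx (fun k row => PySem.List.pySetD row j (c + (k : Int))),
       c + (arr.length : Int)) := by
  have h := seat2_inner j arr [] c
  simpa using h

-- the outer loop after t columns: column j < t of row i holds j*b + i + 1, the rest is 0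
lemma seat2_outer (a b : Int) (hb : 0 < b) :
    ∀ t : Nat, t ≤ a.toNat →
      ((PySem.List.pyRange 0 (t : Int) 1).foldl
        (fun (st : List (List Int) × Int) j =>
          (PySem.List.pyRange 0 b 1).foldl
            (fun (st : List (List Int) × Int) i =>
              (PySem.List.pySetD st.1 i (PySem.List.pySetD (PySem.List.pyGetD st.1 i []) j st.2), st.2 + 1))
            st)
        ((PySem.List.pyRange 0 b 1).map (fun _ => List.replicate a.toNat (0 : Int)), 1))
      = ((List.range b.toNat).map (fun (i : Nat) =>
            (List.range a.toNat).map (fun (j : Nat) =>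
              if j < t then (j : Int) * b + (i : Int) + 1 else 0)),
         (t : Int) * b + 1) := by
  have hbn : b = (b.toNat : Int) := (Int.toNat_of_nonneg hb.le).symm
  intro t
  induction t with
  | zero =>
    intro _
    simp only [Nat.cast_zero]
    rw [PySem.List.pyRange_one_eq_nil le_rfl]
    simp only [List.foldl_nil]
    rw [Prod.mk.injEq]
    refine ⟨?_, by ring⟩
    rw [hbn, PySem.List.pyRange_zero_nat, List.map_map]
    apply List.map_congr_left
    intro i _
    simp
  | succ t ih =>
    intro ht
    rw [show ((t + 1 : Nat) : Int) = (t : Int) + 1 by push_cast; ring,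
        PySem.List.pyRange_one_succ_right (by positivity), List.foldl_append,
        ih (by omega)]
    simp only [List.foldl_cons, List.foldl_nil]
    have hrng0 : PySem.List.pyRange 0 b 1
        = PySem.List.pyRange 0
            ((((List.range b.toNat).map (fun (i : Nat) =>
                (List.range a.toNat).map (fun (j : Nat) =>
                  if j < t then (j : Int) * b + (i : Int) + 1 else 0))).length : Int)) 1 := by
      simp only [List.length_map, List.length_range]
      rw [← hbn]
    rw [hrng0, seat2_inner0]
    rw [Prod.mk.injEq]
    refine ⟨?_, ?_⟩
    · rw [mapIdx_map_range]
      apply List.map_congr_left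
      intro i _
      rw [PySem.List.pySetD_natCast, set_map_range _ _ _ _ (by omega)]
      apply List.map_congr_left
      intro j hj
      by_cases h1 : j = t
      · subst h1; rw [if_pos rfl, if_pos (by omega)]; ring
      · rw [if_neg h1]
        by_cases h2 : j < t
        · rw [if_pos h2, if_pos (by omega)]
        · rw [if_neg h2, if_neg (by omega)]
    · simp only [List.length_map, List.length_range]
      rw [← hbn]; ring

-- B's stage-2 transpose of the stage-1 column blocks gives the closed-form grid
lemma seat2_alt_closed (a b : Int) (hb : 0 < b) :
    seat2_alt a b
      = (List.range b.toNat).map (fun (i : Nat) =>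
          (List.range a.toNat).map (fun (j : Nat) => (j : Int) * b + (i : Int) + 1)) := by
  have hbn : b = (b.toNat : Int) := (Int.toNat_of_nonneg hb.le).symm
  unfold seat2_alt
  have hB : PySem.List.pyRange 0 b 1 = (List.range b.toNat).map (fun (k : Nat) => (k : Int)) := by
    rw [hbn]; exact PySem.List.pyRange_zero_nat _
  have hA : PySem.List.pyRange 0 a 1 = (List.range a.toNat).map (fun (k : Nat) => (k : Int)) := by
    rw [pyRange_zero_toNat a]; exact PySem.List.pyRange_zero_nat _
  rw [hA, hB]
  simp only [List.map_map]
  apply List.map_congr_left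
  intro i hi
  simp only [List.mem_range] at hi
  simp only [Function.comp]
  apply List.map_congr_left
  intro j _
  simp only [Function.comp]
  have hlen : i < (PySem.List.pyRange ((j : Int) * b + 1) ((j : Int) * b + b + 1) 1).length := by
    rw [PySem.List.length_pyRange_one]; omega
  rw [PySem.List.pyGetD_natCast, List.getD_eq_getElem _ _ hlen,
      PySem.List.getElem_pyRange_one]
  ring

-- ===== VERDICT (by name: the statement is the Claim_ definition above) =====
theorem seat2_spec : Claim_equal_seat2 := by
  intro a b _
  unfold Spec_seat2
  by_cases hb : 0 < b
  · rw [seat2_alt_closed a b hb]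
    unfold seat2
    rw [pyRange_zero_toNat a, seat2_outer a b hb a.toNat le_rfl]
    apply List.map_congr_left
    intro i _
    apply List.map_congr_left
    intro j hj
    simp only [List.mem_range] at hj
    simp [hj]
  · have h1 : PySem.List.pyRange 0 b 1 = [] := PySem.List.pyRange_one_eq_nil (by omega)
    unfold seat2 seat2_alt
    simp [h1, List.foldl_fixed]
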